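-- pv_equiv track=rewrite | github.com/pranjal269/LLM_baja | app/services/chunker.py | _find_page_number
-- ===== SOURCE A (Python) =====
-- from typing import List, Dict, Any
--
-- def _find_page_number(chunk_text: str, page_texts: Dict[int, str]) -> int:
--     """Find the most likely page number for a chunk"""
--     max_overlap = 0
--     best_page = None
--
--     chunk_words = set(chunk_text.lower().split())
--
--     for page_num, page_text in page_texts.items():
--         page_words = set(page_text.lower().split())
--         overlap = len(chunk_words.intersection(page_words))
--
--         if overlap > max_overlap:
--             max_overlap = overlap
--             best_page = page_num
--
--     return best_page
-- ===== SOURCE B (Python) =====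
-- def _find_page_number(chunk_text, page_texts):
--     """Inverted-index version: posting lists word -> pages, then per-page hit counts."""
--     postings = []
--     for page_num, page_text in page_texts.items():
--         for w in set(page_text.lower().split()):
--             postings.append((w, page_num))
--     index = {}
--     for w, p in postings:
--         index.setdefault(w, []).append(p)
--     counts = {}
--     for w in set(chunk_text.lower().split()):
--         for p in index.get(w, []):
--             counts[p] = counts.get(p, 0) + 1
--     max_overlap = 0
--     best_page = None
--     for page_num in page_texts:
--         c = counts.get(page_num, 0)
--         if c > max_overlap:
--             max_overlap = c
--             best_page = page_num
--     return best_page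
-- ===== Notes on version B (the rewrite author's own statement) =====
-- stated objective: alternative
-- what changed: B replaces A's per-page set-intersection scan by an inverted index: it builds word->pages posting lists once, accumulates per-page hit counts from the chunk's distinct words, and then picks the first page whose count strictly exceeds the running maximum.
import Mathlib
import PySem

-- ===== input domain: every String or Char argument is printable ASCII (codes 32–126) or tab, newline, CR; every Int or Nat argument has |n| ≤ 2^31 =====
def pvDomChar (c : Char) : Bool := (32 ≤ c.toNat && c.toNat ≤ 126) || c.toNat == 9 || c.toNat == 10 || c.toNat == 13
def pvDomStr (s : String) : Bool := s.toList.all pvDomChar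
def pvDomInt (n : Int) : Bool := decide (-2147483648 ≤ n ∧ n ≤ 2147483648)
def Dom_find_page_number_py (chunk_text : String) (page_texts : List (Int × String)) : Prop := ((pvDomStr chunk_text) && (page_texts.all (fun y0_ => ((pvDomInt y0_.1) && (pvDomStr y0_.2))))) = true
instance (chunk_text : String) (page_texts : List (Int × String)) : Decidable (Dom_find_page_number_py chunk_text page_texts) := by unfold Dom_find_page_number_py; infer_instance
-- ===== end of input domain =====

-- B replaces A's per-page set-intersection scan by an inverted index (word -> posting list of
-- pages) plus per-page hit counts built from the chunk's distinct words; same results either way.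

-- ===== PORT A =====
def find_page_number_py (chunk_text : String) (page_texts : List (Int × String)) : Option Int :=
  let chunk_words : PySem.Set String := PySem.Set.ofList (PySem.Str.split₀ (PySem.Str.lower chunk_text))
  let r := (PySem.Dict.ofList page_texts).items.foldl
    (fun (acc : Int × Option Int) pg =>
      let page_words : PySem.Set String := PySem.Set.ofList (PySem.Str.split₀ (PySem.Str.lower pg.2))
      let overlap : Int := PySem.Set.len (PySem.Set.inter chunk_words page_words)
      if acc.1 < overlap then (overlap, some pg.1) else acc)
    (0, none)
  r.2

-- ===== PORT B =====
def find_page_number_py_alt (chunk_text : String) (page_texts : List (Int × String)) : Option Int :=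
  let d := PySem.Dict.ofList page_texts
  let postings : List (String × Int) :=
    d.items.foldl (fun ps pg =>
      (PySem.Set.ofList (PySem.Str.split₀ (PySem.Str.lower pg.2))).foldl
        (fun ps w => ps ++ [(w, pg.1)]) ps) []
  let index : PySem.Dict String (List Int) :=
    postings.foldl (fun idx wp => idx.modify wp.1 [] (fun l => l ++ [wp.2])) PySem.Dict.empty
  let counts : PySem.Dict Int Int :=
    (PySem.Set.ofList (PySem.Str.split₀ (PySem.Str.lower chunk_text))).foldl
      (fun cts w => (index.getD w []).foldl (fun cts p => cts.modify p 0 (· + 1)) cts)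
      PySem.Dict.empty
  let r := d.keys.foldl
    (fun (acc : Int × Option Int) p =>
      let c := counts.getD p 0
      if acc.1 < c then (c, some p) else acc)
    (0, none)
  r.2

-- ===== PRECONDITION & SPEC =====
def Spec_find_page_number_py (chunk_text : String) (page_texts : List (Int × String)) (out : Option Int) : Prop := out = find_page_number_py_alt chunk_text page_texts
instance (chunk_text : String) (page_texts : List (Int × String)) (out : Option Int) : Decidable (Spec_find_page_number_py chunk_text page_texts out) := by unfold Spec_find_page_number_py; infer_instance

-- ===== CLAIM (what is proved, stated in full; the proofs are below) =====
def Claim_equal_find_page_number_py : Prop := ∀ (chunk_text : String) (page_texts : List (Int × String)), Dom_find_page_number_py chunk_text page_texts → Spec_find_page_number_py chunk_text page_texts (find_page_number_py chunk_text page_texts)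

-- ===== LEMMAS AND PROOFS =====

def pvWords (s : String) : List String := PySem.Set.ofList (PySem.Str.split₀ (PySem.Str.lower s))
def pvPost (pg : Int × String) : List (String × Int) := (pvWords pg.2).map (fun w => (w, pg.1))

theorem pv_count_post (ws : List String) (hnd : ws.Nodup) (k p : Int) (w : String) :
    (((ws.map (fun w' => (w', k))).filter (fun wp => wp.1 == w)).map (·.2)).count p
      = if k == p && decide (w ∈ ws) then 1 else 0 := by
  induction ws with
  | nil => simp
  | cons a ws ih =>
    simp only [List.map_cons, List.filter_cons] at *
    have hnd' := hnd.of_cons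
    by_cases haw : a = w
    · subst haw
      have hw : a ∉ ws := (List.nodup_cons.mp hnd).1
      simp [ih hnd', hw, List.count_cons]
    · simp only [show ((a, k).1 == w) = false from by simp [haw], Bool.false_eq_true, if_false]
      rw [ih hnd']
      have hwa : ¬ w = a := fun h => haw h.symm
      simp [hwa]

theorem pv_count_flatMap (l : List (Int × String)) (w : String) (p : Int) :
    (((l.flatMap pvPost).filter (fun wp => wp.1 == w)).map (·.2)).count p
      = l.countP (fun pg => pg.1 == p && decide (w ∈ pvWords pg.2)) := by
  induction l with
  | nil => simp
  | cons pg l ih =>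
    simp only [List.flatMap_cons, List.filter_append, List.map_append, List.count_append,
      List.countP_cons, ih]
    have h := pv_count_post (pvWords pg.2) (PySem.Set.nodup_ofList _) pg.1 p w
    simp only [pvPost]
    rw [h]
    by_cases h1 : pg.1 = p <;> by_cases h2 : w ∈ pvWords pg.2 <;> simp [h1, h2] <;> omega

theorem pv_countP_unique (l : List (Int × String)) (hn : (l.map (·.1)).Nodup)
    (p : Int) (t : String) (hm : (p, t) ∈ l) (q : String → Bool) :
    l.countP (fun pg => pg.1 == p && q pg.2) = if q t then 1 else 0 := by
  induction l with
  | nil => simp at hm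
  | cons a l ih =>
    simp only [List.map_cons, List.nodup_cons] at hn
    rw [List.countP_cons]
    rcases List.mem_cons.mp hm with h | h
    · subst h
      have : l.countP (fun pg => pg.1 == p && q pg.2) = 0 := by
        apply List.countP_eq_zero.mpr
        intro pg hpg
        have hmem : pg.1 ∈ l.map (fun x => x.1) := List.mem_map_of_mem hpg
        have : pg.1 ≠ p := by
          intro he; rw [he] at hmem; exact hn.1 hmem
        simp [this]
      simp [this]
    · have hp : p ∈ l.map (fun x => x.1) := List.mem_map.mpr ⟨(p, t), h, rfl⟩
      have hne : a.1 ≠ p := by intro he; rw [he] at hn; exact hn.1 hp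
      rw [ih hn.2 h]
      simp [hne]

theorem pv_postings_eq (l : List (Int × String)) :
    l.foldl (fun ps pg =>
      (PySem.Set.ofList (PySem.Str.split₀ (PySem.Str.lower pg.2))).foldl
        (fun ps w => ps ++ [(w, pg.1)]) ps) [] = l.flatMap pvPost := by
  have h1 : ∀ (ws : List String) (k : Int) (ps : List (String × Int)),
      ws.foldl (fun ps w => ps ++ [(w, k)]) ps = ps ++ ws.map (fun w => (w, k)) := by
    intro ws k
    induction ws with
    | nil => simp
    | cons w ws ih => intro ps; simp [List.foldl_cons, ih]
  calc l.foldl (fun ps pg =>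
      (PySem.Set.ofList (PySem.Str.split₀ (PySem.Str.lower pg.2))).foldl
        (fun ps w => ps ++ [(w, pg.1)]) ps) []
      = l.foldl (fun ps pg => ps ++ pvPost pg) [] := by
        apply PySem.List.foldl_congr_mem
        intro acc pg _
        exact h1 _ _ acc
    _ = [] ++ l.flatMap pvPost := PySem.List.foldl_append_eq_flatMap _ _ _
    _ = l.flatMap pvPost := by simp

theorem pv_counts_getD (index : PySem.Dict String (List Int)) (cw : List String) :
    ∀ (cts : PySem.Dict Int Int) (p : Int),
    (cw.foldl (fun cts w => (index.getD w []).foldl (fun cts p => cts.modify p 0 (· + 1)) cts) cts).getD p 0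
      = cts.getD p 0 + (cw.map (fun w => ((index.getD w []).count p : Int))).sum := by
  induction cw with
  | nil => simp
  | cons w cw ih =>
    intro cts p
    simp only [List.foldl_cons, List.map_cons, List.sum_cons, ih,
      PySem.Dict.getD_foldl_modify_add_one]
    ring

theorem pv_sum_ite (pw : List String) (cw : List String) :
    (cw.map (fun w => if w ∈ pw then (1 : Int) else 0)).sum
      = ((cw.filter (fun w => decide (w ∈ pw))).length : Int) := by
  induction cw with
  | nil => simp
  | cons w cw ih =>
    by_cases h : w ∈ pw <;> simp [h, ih] <;> ring

set_option maxHeartbeats 1000000 in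
theorem pv_core (ct : String) (pts : List (Int × String)) :
    ((PySem.Dict.ofList pts).items.foldl
      (fun (acc : Int × Option Int) pg =>
        if acc.1 < PySem.Set.len (PySem.Set.inter
            (PySem.Set.ofList (PySem.Str.split₀ (PySem.Str.lower ct)))
            (PySem.Set.ofList (PySem.Str.split₀ (PySem.Str.lower pg.2))))
        then (PySem.Set.len (PySem.Set.inter
            (PySem.Set.ofList (PySem.Str.split₀ (PySem.Str.lower ct)))
            (PySem.Set.ofList (PySem.Str.split₀ (PySem.Str.lower pg.2)))), some pg.1)
        else acc)
      (0, none)).2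
    = ((PySem.Dict.ofList pts).keys.foldl
      (fun (acc : Int × Option Int) p =>
        if acc.1 < (((PySem.Set.ofList (PySem.Str.split₀ (PySem.Str.lower ct))).foldl
            (fun cts w => ((((PySem.Dict.ofList pts).items.foldl
                (fun ps pg => (PySem.Set.ofList (PySem.Str.split₀ (PySem.Str.lower pg.2))).foldl
                  (fun ps w => ps ++ [(w, pg.1)]) ps) []).foldl
              (fun idx wp => idx.modify wp.1 [] (fun l => l ++ [wp.2])) PySem.Dict.empty).getD w []).foldl
              (fun cts p => cts.modify p 0 (· + 1)) cts)
            PySem.Dict.empty).getD p 0)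
        then ((((PySem.Set.ofList (PySem.Str.split₀ (PySem.Str.lower ct))).foldl
            (fun cts w => ((((PySem.Dict.ofList pts).items.foldl
                (fun ps pg => (PySem.Set.ofList (PySem.Str.split₀ (PySem.Str.lower pg.2))).foldl
                  (fun ps w => ps ++ [(w, pg.1)]) ps) []).foldl
              (fun idx wp => idx.modify wp.1 [] (fun l => l ++ [wp.2])) PySem.Dict.empty).getD w []).foldl
              (fun cts p => cts.modify p 0 (· + 1)) cts)
            PySem.Dict.empty).getD p 0), some p)
        else acc)
      (0, none)).2 := by
  rw [pv_postings_eq]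
  have hkeys : (PySem.Dict.ofList pts).keys = (PySem.Dict.ofList pts).items.map (·.1) := rfl
  rw [hkeys, List.foldl_map]
  refine congrArg Prod.snd ?_
  apply PySem.List.foldl_congr_mem
  intro acc pg hpg
  have hcount :
      ((((PySem.Dict.ofList pts).items.flatMap pvPost).foldl
          (fun idx wp => idx.modify wp.1 [] (fun l => l ++ [wp.2])) PySem.Dict.empty).getD · [])
        = fun w => (((PySem.Dict.ofList pts).items.flatMap pvPost).filter (fun wp => wp.1 == w)).map (·.2) := by
    funext w
    rw [PySem.Dict.getD_foldl_modify_append]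
    simp
  have hm : (pg.1, pg.2) ∈ (PySem.Dict.ofList pts).items := by simpa using hpg
  have hn : ((PySem.Dict.ofList pts).items.map (·.1)).Nodup := PySem.Dict.nodup_keys_ofList pts
  have hc : (((PySem.Set.ofList (PySem.Str.split₀ (PySem.Str.lower ct))).foldl
      (fun cts w => ((((PySem.Dict.ofList pts).items.flatMap pvPost).foldl
          (fun idx wp => idx.modify wp.1 [] (fun l => l ++ [wp.2])) PySem.Dict.empty).getD w []).foldl
        (fun cts p => cts.modify p 0 (· + 1)) cts) PySem.Dict.empty).getD pg.1 0)
      = PySem.Set.len (PySem.Set.inter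
          (PySem.Set.ofList (PySem.Str.split₀ (PySem.Str.lower ct)))
          (PySem.Set.ofList (PySem.Str.split₀ (PySem.Str.lower pg.2)))) := by
    rw [pv_counts_getD]
    simp only [PySem.Dict.getD_empty, zero_add]
    have hterm : ∀ w, (((((PySem.Dict.ofList pts).items.flatMap pvPost).foldl
          (fun idx wp => idx.modify wp.1 [] (fun l => l ++ [wp.2])) PySem.Dict.empty).getD w []).count pg.1 : Int)
        = if w ∈ pvWords pg.2 then (1 : Int) else 0 := by
      intro w
      rw [congrFun hcount w, pv_count_flatMap,
        pv_countP_unique _ hn pg.1 pg.2 hm (fun s => decide (w ∈ pvWords s))]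
      by_cases h : w ∈ pvWords pg.2 <;> simp [h]
    rw [List.map_congr_left (fun w _ => hterm w)]
    rw [show (PySem.Set.ofList (PySem.Str.split₀ (PySem.Str.lower ct)) : List String) = pvWords ct from rfl,
      pv_sum_ite (pvWords pg.2) (pvWords ct)]
    simp [PySem.Set.len, PySem.Set.inter, pvWords]
  rw [hc]


-- ===== VERDICT (by name: the statement is the Claim_ definition above) =====
theorem find_page_number_py_spec : Claim_equal_find_page_number_py := by
  intro ct pts _
  unfold Spec_find_page_number_py
  exact pv_core ct pts
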